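-- pv_equiv track=rewrite | github.com/markbwarner/app-migration-resource-kit | code-assessment-tool/scanner/detectors.py | _matches_keyword_rule
-- ===== SOURCE A (Python) =====
-- from typing import Iterable, List
--
-- def _matches_keyword_rule(normalized_identifier: str, keywords: Iterable[str]) -> bool:
--     parts = [part for part in normalized_identifier.split("_") if part]
--     joined_parts = "_".join(parts)
--     for keyword in keywords:
--         if joined_parts == keyword:
--             return True
--         if joined_parts.startswith(f"{keyword}_") or joined_parts.endswith(f"_{keyword}"):
--             return True
--         keyword_parts = keyword.split("_")
--         if len(keyword_parts) > 1:
--             for start in range(0, max(1, len(parts) - len(keyword_parts) + 1)):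
--                 if parts[start : start + len(keyword_parts)] == keyword_parts:
--                     return True
--     return False
-- ===== SOURCE B (Python) =====
-- def _matches_keyword_rule(normalized_identifier: str, keywords) -> bool:
--     parts = [part for part in normalized_identifier.split("_") if part]
--     joined_parts = "_".join(parts)
--     padded = f"_{joined_parts}_"
--     return any(
--         joined_parts == keyword
--         or joined_parts.startswith(f"{keyword}_")
--         or joined_parts.endswith(f"_{keyword}")
--         or ("_" in keyword and f"_{keyword}_" in padded)
--         for keyword in keywords
--     )
-- ===== Notes on version B (the rewrite author's own statement) =====
-- stated objective: idiomatic
-- what changed: The per-keyword nested scan over contiguous windows of the parts list is replaced by a single substring test f'_{keyword}_' in the precomputed '_'-padded joined string, gated on multi-part keywords, with the keyword loop folded into any().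
import Mathlib
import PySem

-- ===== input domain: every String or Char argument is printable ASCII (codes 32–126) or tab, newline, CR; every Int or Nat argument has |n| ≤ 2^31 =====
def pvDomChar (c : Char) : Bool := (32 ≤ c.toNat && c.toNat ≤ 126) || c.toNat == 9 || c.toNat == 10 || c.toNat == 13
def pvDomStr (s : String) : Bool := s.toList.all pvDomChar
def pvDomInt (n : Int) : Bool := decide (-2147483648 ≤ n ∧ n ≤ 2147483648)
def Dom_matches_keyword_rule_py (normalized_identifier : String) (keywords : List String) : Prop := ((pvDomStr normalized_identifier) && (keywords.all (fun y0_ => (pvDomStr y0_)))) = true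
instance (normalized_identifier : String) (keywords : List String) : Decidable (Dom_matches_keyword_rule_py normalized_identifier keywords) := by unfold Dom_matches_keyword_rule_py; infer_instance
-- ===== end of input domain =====

-- B replaces A's per-keyword nested window scan over the parts list by one substring test on the '_'-padded joined string (idiomatic).

-- ===== PORT A =====
-- the 'for keyword in keywords' loop with its early returns
-- ('.getD []' is unreachable: split? is none only for an empty separator, and the separator is the literal "_")
def matches_keyword_rule_py_loop (parts : List String) (joined_parts : String) : List String → Bool
  | [] => false
  | keyword :: rest =>
    if joined_parts == keyword then true
    else if PySem.Str.startswith joined_parts (keyword ++ "_")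
            || PySem.Str.endswith joined_parts ("_" ++ keyword) then true
    else
      let keyword_parts := (PySem.Str.split? keyword "_").getD []
      if 1 < keyword_parts.length then
        if (PySem.List.pyRange 0 (max 1 (PySem.List.len parts - PySem.List.len keyword_parts + 1)) 1).any
             (fun start =>
               PySem.List.slice parts (some start) (some (start + PySem.List.len keyword_parts)) == keyword_parts)
        then true
        else matches_keyword_rule_py_loop parts joined_parts rest
      else matches_keyword_rule_py_loop parts joined_parts rest

def matches_keyword_rule_py (normalized_identifier : String) (keywords : List String) : Bool :=
  let parts := ((PySem.Str.split? normalized_identifier "_").getD []).filter (fun part => !(part == ""))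
  let joined_parts := PySem.Str.join "_" parts
  matches_keyword_rule_py_loop parts joined_parts keywords

-- ===== PORT B =====
def matches_keyword_rule_py_alt (normalized_identifier : String) (keywords : List String) : Bool :=
  let parts := ((PySem.Str.split? normalized_identifier "_").getD []).filter (fun part => !(part == ""))
  let joined_parts := PySem.Str.join "_" parts
  let padded := "_" ++ joined_parts ++ "_"
  keywords.any (fun keyword =>
    joined_parts == keyword
    || PySem.Str.startswith joined_parts (keyword ++ "_")
    || PySem.Str.endswith joined_parts ("_" ++ keyword)
    || (PySem.Str.isIn "_" keyword && PySem.Str.isIn ("_" ++ keyword ++ "_") padded))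

-- ===== PRECONDITION & SPEC =====
def Spec_matches_keyword_rule_py (normalized_identifier : String) (keywords : List String) (out : Bool) : Prop := out = matches_keyword_rule_py_alt normalized_identifier keywords
instance (normalized_identifier : String) (keywords : List String) (out : Bool) : Decidable (Spec_matches_keyword_rule_py normalized_identifier keywords out) := by unfold Spec_matches_keyword_rule_py; infer_instance

-- ===== CLAIM (what is proved, stated in full; the proofs are below) =====
def Claim_equal_matches_keyword_rule_py : Prop := ∀ (normalized_identifier : String) (keywords : List String), Dom_matches_keyword_rule_py normalized_identifier keywords → Spec_matches_keyword_rule_py normalized_identifier keywords (matches_keyword_rule_py normalized_identifier keywords)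

-- ===== LEMMAS AND PROOFS =====

-- reference splitter: pvSp cur l = the '_'-separated pieces of cur ++ l (cur = the piece built so far)
def pvSp (cur : List Char) : List Char → List (List Char)
  | [] => [cur]
  | c :: rest => if c = '_' then cur :: pvSp [] rest else pvSp (cur ++ [c]) rest

theorem pvSp_cons_us (cur rest : List Char) : pvSp cur ('_' :: rest) = cur :: pvSp [] rest := by
  simp [pvSp]

theorem pvSp_cons_ne {c : Char} (h : c ≠ '_') (cur rest : List Char) :
    pvSp cur (c :: rest) = pvSp (cur ++ [c]) rest := by
  simp [pvSp, h]

theorem pvSp_ne_nil (l cur : List Char) : pvSp cur l ≠ [] := by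
  induction l generalizing cur with
  | nil => simp [pvSp]
  | cons c rest ih =>
    by_cases h : c = '_'
    · subst h; rw [pvSp_cons_us]; simp
    · rw [pvSp_cons_ne h]; exact ih _

theorem pvSp_go_eq (fuel : Nat) (l cur : List Char) (acc : List (List Char)) (h : l.length < fuel) :
    PySem.Chars.splitOn.go ['_'] fuel l cur acc = acc.reverse ++ pvSp cur.reverse l := by
  induction fuel generalizing l cur acc with
  | zero => omega
  | succ fuel ih =>
    match l, h with
    | [], _ => rw [PySem.Chars.splitOn.go.eq_def]; simp [pvSp]
    | c :: rest, h =>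
      rw [PySem.Chars.splitOn.go.eq_def]
      by_cases hc : c = '_'
      · subst hc
        have hpre : List.isPrefixOf ['_'] ('_' :: rest) = true := by
          simp [List.isPrefixOf]
        simp only [hpre, if_pos]
        rw [ih _ _ _ (by simpa using Nat.lt_of_succ_lt_succ h)]
        rw [pvSp_cons_us]
        simp
      · have hpre : List.isPrefixOf ['_'] (c :: rest) = false := by
          simp [List.isPrefixOf]
          exact fun hh => hc hh.symm
        simp only [hpre, Bool.false_eq_true, if_false]
        rw [ih _ _ _ (by simpa using Nat.lt_of_succ_lt_succ h)]
        rw [pvSp_cons_ne hc]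
        simp

theorem pvSp_splitOn (cs : List Char) : PySem.Chars.splitOn cs ['_'] = pvSp [] cs := by
  have := pvSp_go_eq (cs.length + 1) cs [] [] (by omega)
  simpa [PySem.Chars.splitOn] using this

theorem pvSp_no_underscore (l : List Char) : ∀ (cur : List Char), '_' ∉ cur →
    ∀ p ∈ pvSp cur l, '_' ∉ p := by
  induction l with
  | nil => intro cur hcur; simpa [pvSp] using hcur
  | cons c rest ih =>
    intro cur hcur
    by_cases h : c = '_'
    · subst h; rw [pvSp_cons_us]
      intro p hp
      rcases List.mem_cons.1 hp with rfl | hp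
      · exact hcur
      · exact ih [] (by simp) p hp
    · rw [pvSp_cons_ne h]
      refine ih (cur ++ [c]) ?_
      simp only [List.mem_append, List.mem_singleton]
      rintro (h' | h')
      · exact hcur h'
      · exact h h'.symm

theorem pvSp_length_gt_one (l : List Char) : ∀ (cur : List Char),
    (1 < (pvSp cur l).length ↔ '_' ∈ l) := by
  induction l with
  | nil => intro cur; simp [pvSp]
  | cons c rest ih =>
    intro cur
    by_cases h : c = '_'
    · subst h; rw [pvSp_cons_us]
      have h0 : 0 < (pvSp [] rest).length := List.length_pos_iff.2 (pvSp_ne_nil rest [])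
      constructor
      · intro _; exact List.mem_cons_self
      · intro _
        simp only [List.length_cons]
        omega
    · rw [pvSp_cons_ne h, ih]
      have h2 : ¬ ('_' = c) := fun hh => h hh.symm
      simp [List.mem_cons, h2]

theorem pvSp_join (l : List Char) : ∀ (cur : List Char),
    PySem.Chars.join ['_'] (pvSp cur l) = cur ++ l := by
  induction l with
  | nil => intro cur; simp [pvSp, PySem.Chars.join_singleton]
  | cons c rest ih =>
    intro cur
    by_cases h : c = '_'
    · subst h; rw [pvSp_cons_us]
      obtain ⟨q, ts, hq⟩ := List.exists_cons_of_ne_nil (pvSp_ne_nil rest [])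
      rw [hq, PySem.Chars.join_cons_cons, ← hq, ih []]
      simp
    · rw [pvSp_cons_ne h, ih (cur ++ [c])]
      simp

-- glue: pvG [p1,…,pn] = p1 ++ '_' :: p2 ++ '_' :: … pn ++ ['_']
def pvG : List (List Char) → List Char
  | [] => []
  | p :: ps => p ++ '_' :: pvG ps

theorem pvG_eq_join (p : List Char) (ps : List (List Char)) :
    PySem.Chars.join ['_'] (p :: ps) ++ ['_'] = pvG (p :: ps) := by
  induction ps generalizing p with
  | nil => simp [PySem.Chars.join_singleton, pvG]
  | cons q ts ih =>
    rw [PySem.Chars.join_cons_cons]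
    show (p ++ ['_'] ++ PySem.Chars.join ['_'] (q :: ts)) ++ ['_'] = p ++ '_' :: pvG (q :: ts)
    rw [List.append_assoc, List.append_assoc, ih q]
    simp

theorem pref_glue (q : List Char) : ∀ (p X Y : List Char), '_' ∉ q → '_' ∉ p →
    ((q ++ '_' :: X) <+: (p ++ '_' :: Y) ↔ q = p ∧ X <+: Y) := by
  induction q with
  | nil =>
    intro p X Y _ hp
    cases p with
    | nil => simp [List.cons_prefix_cons]
    | cons d p' =>
      simp only [List.nil_append, List.cons_append, List.cons_prefix_cons]
      constructor
      · rintro ⟨h1, -⟩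
        exact absurd (h1 ▸ List.mem_cons_self) hp
      · rintro ⟨h, -⟩; exact absurd h (by simp)
  | cons c q' ih =>
    intro p X Y hq hp
    cases p with
    | nil =>
      simp only [List.cons_append, List.nil_append, List.cons_prefix_cons]
      constructor
      · rintro ⟨h1, -⟩
        exact absurd (h1 ▸ List.mem_cons_self) hq
      · rintro ⟨h, -⟩; exact absurd h (by simp)
    | cons d p' =>
      simp only [List.cons_append, List.cons_prefix_cons]
      rw [ih p' X Y (fun h => hq (List.mem_cons_of_mem _ h)) (fun h => hp (List.mem_cons_of_mem _ h))]
      constructor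
      · rintro ⟨rfl, rfl, h⟩; exact ⟨rfl, h⟩
      · rintro ⟨h, hx⟩
        injection h with h1 h2
        exact ⟨h1, h2 ▸ ⟨rfl, hx⟩⟩

theorem pvG_prefix (qs : List (List Char)) : ∀ (ps : List (List Char)),
    (∀ q ∈ qs, '_' ∉ q) → (∀ p ∈ ps, '_' ∉ p) →
    (pvG qs <+: pvG ps ↔ qs <+: ps) := by
  induction qs with
  | nil => intro ps _ _; simp [pvG]
  | cons q qs' ih =>
    intro ps hq hp
    cases ps with
    | nil =>
      simp only [pvG, List.prefix_nil]
      constructor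
      · intro h; exact absurd h (by simp)
      · intro h; exact absurd h (by simp)
    | cons p ps' =>
      show (q ++ '_' :: pvG qs') <+: (p ++ '_' :: pvG ps') ↔ _
      rw [pref_glue q p (pvG qs') (pvG ps') (hq q List.mem_cons_self) (hp p List.mem_cons_self)]
      rw [ih ps' (fun x hx => hq x (List.mem_cons_of_mem _ hx)) (fun x hx => hp x (List.mem_cons_of_mem _ hx))]
      exact (List.cons_prefix_cons).symm

theorem pv_infix_step (p : List Char) (hp : '_' ∉ p) (A B : List Char) :
    (('_' :: A) <:+: (p ++ '_' :: B)) ↔ (('_' :: A) <:+: ('_' :: B)) := by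
  induction p with
  | nil => simp
  | cons c p' ih =>
    have hc : c ≠ '_' := by intro h; exact hp (h ▸ List.mem_cons_self)
    rw [List.cons_append, List.infix_cons_iff]
    rw [ih (fun h => hp (List.mem_cons_of_mem _ h))]
    constructor
    · rintro (h | h)
      · rcases List.cons_prefix_cons.1 h with ⟨h1, -⟩
        exact absurd h1.symm hc
      · exact h
    · exact Or.inr

theorem pv_main (qs : List (List Char)) (hq : ∀ q ∈ qs, '_' ∉ q) (hqne : qs ≠ []) :
    ∀ (ps : List (List Char)), (∀ p ∈ ps, p ≠ [] ∧ '_' ∉ p) →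
    (qs <:+: ps ↔ ('_' :: pvG qs) <:+: ('_' :: pvG ps)) := by
  intro ps
  induction ps with
  | nil =>
    intro _
    obtain ⟨q, qs', rfl⟩ := List.exists_cons_of_ne_nil hqne
    simp only [pvG, List.infix_nil]
    constructor
    · intro h; exact absurd h (by simp)
    · intro h
      have hlen := List.IsInfix.length_le h
      simp at hlen
  | cons p ps' ih =>
    intro hp
    have hpg : '_' ∉ p := (hp p List.mem_cons_self).2
    have hp' : ∀ x ∈ ps', x ≠ [] ∧ '_' ∉ x := fun x hx => hp x (List.mem_cons_of_mem _ hx)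
    have h1 : qs <:+: p :: ps' ↔ qs <+: p :: ps' ∨ qs <:+: ps' := List.infix_cons_iff
    have h2 : ('_' :: pvG qs) <:+: ('_' :: pvG (p :: ps')) ↔
        ('_' :: pvG qs) <+: ('_' :: pvG (p :: ps')) ∨ ('_' :: pvG qs) <:+: pvG (p :: ps') :=
      List.infix_cons_iff
    have h3 : ('_' :: pvG qs) <+: ('_' :: pvG (p :: ps')) ↔ pvG qs <+: pvG (p :: ps') := by
      simp [List.cons_prefix_cons]
    have h4 := pvG_prefix qs (p :: ps') hq (fun x hx => (hp x hx).2)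
    have h5 : ('_' :: pvG qs) <:+: pvG (p :: ps') ↔ qs <:+: ps' := by
      show ('_' :: pvG qs) <:+: (p ++ '_' :: pvG ps') ↔ _
      rw [pv_infix_step p hpg]
      exact (ih hp').symm
    rw [h1, h2, h3, h4, h5]

-- a matching window of length |kp| ↔ kp is a contiguous sublist (pure list fact)
theorem pv_window_iff {α : Type} (parts kp : List α) :
    ((∃ m : Nat, (m : Int) < max 1 ((parts.length : Int) - kp.length + 1) ∧
        (parts.drop m).take kp.length = kp) ↔ kp <:+: parts) := by
  constructor
  · rintro ⟨m, _, hw⟩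
    refine ⟨parts.take m, (parts.drop m).drop kp.length, ?_⟩
    calc parts.take m ++ kp ++ ((parts.drop m).drop kp.length)
        = parts.take m ++ ((parts.drop m).take kp.length ++ (parts.drop m).drop kp.length) := by
          rw [hw, List.append_assoc]
      _ = parts.take m ++ parts.drop m := by rw [List.take_append_drop]
      _ = parts := List.take_append_drop m parts
  · rintro ⟨u, v, huv⟩
    refine ⟨u.length, ?_, ?_⟩
    · have : parts.length = u.length + kp.length + v.length := by
        rw [← huv]; simp; omega
      omega
    · rw [← huv, List.append_assoc, List.drop_left, List.take_left]

theorem pv_infix_map {α β : Type} (f : α → β) (hf : Function.Injective f) (l1 l2 : List α) :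
    (l1.map f <:+: l2.map f) ↔ l1 <:+: l2 := by
  constructor
  · rintro ⟨u, v, h⟩
    rw [List.append_assoc] at h
    obtain ⟨u', rest, rfl, hu, hrest⟩ := List.map_eq_append_iff.1 h.symm
    obtain ⟨m, v', rfl, hm, hv⟩ := List.map_eq_append_iff.1 hrest
    have hml : m = l1 := (List.map_injective_iff.2 hf) hm
    exact ⟨u', v', by rw [hml, List.append_assoc]⟩
  · exact fun h => h.map f

theorem pv_singleton_infix {α : Type} (c : α) (l : List α) : [c] <:+: l ↔ c ∈ l := by
  constructor
  · rintro ⟨u, v, rfl⟩; simp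
  · intro h
    obtain ⟨u, v, rfl⟩ := List.append_of_mem h
    exact ⟨u, v, by simp⟩

theorem pv_inner (parts : List String) (joined kw : String)
    (hgood : ∀ p ∈ parts, p.toList ≠ [] ∧ '_' ∉ p.toList)
    (hjoined : joined.toList = PySem.Chars.join ['_'] (parts.map String.toList)) (L : Bool) :
    (if 1 < ((PySem.Str.split? kw "_").getD []).length then
       (if (PySem.List.pyRange 0 (max 1 (PySem.List.len parts - PySem.List.len ((PySem.Str.split? kw "_").getD []) + 1)) 1).any
            (fun start =>
              PySem.List.slice parts (some start) (some (start + PySem.List.len ((PySem.Str.split? kw "_").getD []))) ==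
                ((PySem.Str.split? kw "_").getD [])) then true else L)
     else L)
    = ((PySem.Str.isIn "_" kw && PySem.Str.isIn ("_" ++ kw ++ "_") ("_" ++ joined ++ "_")) || L) := by
  have hus : ("_" : String).toList = ['_'] := rfl
  set kp := (PySem.Str.split? kw "_").getD [] with hkpdef
  have hkp : kp = (pvSp [] kw.toList).map String.ofList := by
    rw [hkpdef]
    simp [PySem.Str.split?, PySem.Chars.split?, hus, pvSp_splitOn]
  have hqus : ∀ q ∈ pvSp [] kw.toList, '_' ∉ q :=
    pvSp_no_underscore kw.toList [] (by simp)
  have hmulti : 1 < kp.length ↔ '_' ∈ kw.toList := by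
    rw [hkp, List.length_map]
    exact pvSp_length_gt_one kw.toList []
  have hMiff : (PySem.Str.isIn "_" kw = true) ↔ '_' ∈ kw.toList := by
    rw [PySem.Str.isIn_iff_infix, hus, pv_singleton_infix]
  by_cases hm : 1 < kp.length
  · have hMtrue : PySem.Str.isIn "_" kw = true := hMiff.2 (hmulti.1 hm)
    rw [if_pos hm, hMtrue, Bool.true_and]
    have hqne : pvSp [] kw.toList ≠ [] := pvSp_ne_nil kw.toList []
    -- the window scan as an infix statement
    have key : ((PySem.List.pyRange 0 (max 1 (PySem.List.len parts - PySem.List.len kp + 1)) 1).any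
        (fun start =>
          PySem.List.slice parts (some start) (some (start + PySem.List.len kp)) == kp) = true)
        ↔ kp <:+: parts := by
      rw [List.any_eq_true, ← pv_window_iff parts kp]
      constructor
      · rintro ⟨st, hmem, hsl⟩
        rw [PySem.List.mem_pyRange_one] at hmem
        obtain ⟨h0, hlt⟩ := hmem
        rw [beq_iff_eq] at hsl
        rw [PySem.List.slice_toNat parts h0 (by simp [PySem.List.len_eq]; omega)] at hsl
        have he : ((st + PySem.List.len kp).toNat - st.toNat) = kp.length := by
          simp only [PySem.List.len_eq] at *
          omega
        rw [he] at hsl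
        refine ⟨st.toNat, ?_, hsl⟩
        rw [Int.toNat_of_nonneg h0]
        simpa [PySem.List.len_eq] using hlt
      · rintro ⟨m, hmlt, hw⟩
        refine ⟨(m : Int), ?_, ?_⟩
        · rw [PySem.List.mem_pyRange_one]
          refine ⟨by positivity, ?_⟩
          simpa [PySem.List.len_eq] using hmlt
        · rw [beq_iff_eq,
            PySem.List.slice_toNat parts (by positivity) (by simp [PySem.List.len_eq]; omega)]
          have he : (((m : Int) + PySem.List.len kp).toNat - ((m : Int)).toNat) = kp.length := by
            simp only [PySem.List.len_eq] at *
            omega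
          rw [he]
          simpa using hw
    have hof : Function.Injective String.ofList := by
      intro a b h
      have := congrArg String.toList h
      simpa [String.toList_ofList] using this
    have hmm : ∀ l : List String, (l.map String.toList).map String.ofList = l := by
      intro l
      rw [List.map_map]
      exact List.map_congr_left (fun a _ => String.ofList_toList) |>.trans (List.map_id l)
    have hinfix2 : kp <:+: parts ↔ pvSp [] kw.toList <:+: parts.map String.toList := by
      have h6 := pv_infix_map String.ofList hof (pvSp [] kw.toList) (parts.map String.toList)
      rw [hmm parts, ← hkp] at h6
      exact h6
    have hk : PySem.Chars.join ['_'] (pvSp [] kw.toList) = kw.toList := pvSp_join kw.toList []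
    obtain ⟨q, qs', hqq⟩ := List.exists_cons_of_ne_nil hqne
    have hpat : ("_" ++ kw ++ "_").toList = '_' :: pvG (pvSp [] kw.toList) := by
      simp only [String.toList_append, hus]
      conv_rhs => rw [hqq]
      rw [← pvG_eq_join q qs', ← hqq, hk]
      simp
    have hkwne : kw.toList ≠ [] := by
      intro h
      have := hmulti.1 hm
      rw [h] at this
      simp at this
    have hW : ((PySem.List.pyRange 0 (max 1 (PySem.List.len parts - PySem.List.len kp + 1)) 1).any
        (fun start =>
          PySem.List.slice parts (some start) (some (start + PySem.List.len kp)) == kp))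
        = PySem.Str.isIn ("_" ++ kw ++ "_") ("_" ++ joined ++ "_") := by
      rw [Bool.eq_iff_iff, key, hinfix2, PySem.Str.isIn_iff_infix, hpat]
      cases parts with
      | nil =>
        have hpadnil : ("_" ++ joined ++ "_").toList = ['_', '_'] := by
          simp only [String.toList_append, hus, hjoined]
          simp [PySem.Chars.join_nil]
        rw [hpadnil]
        constructor
        · intro h
          have := h.length_le
          rw [hqq] at this
          simp at this
        · intro h
          have hlen := List.IsInfix.length_le h
          simp at hlen
          have : 1 ≤ kw.toList.length := List.length_pos_iff.2 hkwne
          have hGlen : kw.toList.length + 1 ≤ (pvG (pvSp [] kw.toList)).length := by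
            rw [hqq, ← pvG_eq_join q qs', ← hqq, hk]
            simp
          omega
      | cons p0 parts' =>
        have hpsgood : ∀ x ∈ (p0 :: parts').map String.toList, x ≠ [] ∧ '_' ∉ x := by
          intro x hx
          obtain ⟨p, hp, rfl⟩ := List.mem_map.1 hx
          exact hgood p hp
        have hpad : ("_" ++ joined ++ "_").toList
            = '_' :: pvG ((p0 :: parts').map String.toList) := by
          simp only [String.toList_append, hus, hjoined]
          rw [List.map_cons, List.append_assoc, pvG_eq_join]
          rfl
        rw [hpad]
        exact pv_main (pvSp [] kw.toList) hqus hqne ((p0 :: parts').map String.toList) hpsgood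
    rw [hW]
    cases PySem.Str.isIn ("_" ++ kw ++ "_") ("_" ++ joined ++ "_") <;> simp
  · have hMfalse : PySem.Str.isIn "_" kw = false := by
      cases hMM : PySem.Str.isIn "_" kw
      · rfl
      · exact absurd (hmulti.2 (hMiff.1 hMM)) hm
    rw [if_neg hm, hMfalse]
    simp

theorem pv_per_keyword (parts : List String) (joined : String)
    (hgood : ∀ p ∈ parts, p.toList ≠ [] ∧ '_' ∉ p.toList)
    (hjoined : joined.toList = PySem.Chars.join ['_'] (parts.map String.toList)) :
    ∀ (keywords : List String),
    matches_keyword_rule_py_loop parts joined keywords =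
      keywords.any (fun keyword =>
        joined == keyword
        || PySem.Str.startswith joined (keyword ++ "_")
        || PySem.Str.endswith joined ("_" ++ keyword)
        || (PySem.Str.isIn "_" keyword && PySem.Str.isIn ("_" ++ keyword ++ "_") ("_" ++ joined ++ "_"))) := by
  intro keywords
  induction keywords with
  | nil => simp [matches_keyword_rule_py_loop]
  | cons kw rest ih =>
    rw [matches_keyword_rule_py_loop, List.any_cons, ← ih]
    have hInner := pv_inner parts joined kw hgood hjoined (matches_keyword_rule_py_loop parts joined rest)
    by_cases c1 : (joined == kw) = true
    · rw [if_pos c1, c1]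
      simp
    · have c1f : (joined == kw) = false := eq_false_of_ne_true c1
      rw [if_neg c1]
      by_cases c2 : (PySem.Str.startswith joined (kw ++ "_")
          || PySem.Str.endswith joined ("_" ++ kw)) = true
      · rw [if_pos c2]
        simp only [c1f, Bool.false_or]
        rw [c2]
        simp
      · have c2f : (PySem.Str.startswith joined (kw ++ "_")
            || PySem.Str.endswith joined ("_" ++ kw)) = false := eq_false_of_ne_true c2
        rw [if_neg c2]
        simp only [c1f, Bool.false_or, c2f]
        exact hInner

-- ===== VERDICT (by name: the statement is the Claim_ definition above) =====
theorem matches_keyword_rule_py_spec : Claim_equal_matches_keyword_rule_py := by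
  intro s keywords _
  unfold Spec_matches_keyword_rule_py matches_keyword_rule_py matches_keyword_rule_py_alt
  have hus : ("_" : String).toList = ['_'] := rfl
  have hsplit : (PySem.Str.split? s "_").getD [] = (pvSp [] s.toList).map String.ofList := by
    simp [PySem.Str.split?, PySem.Chars.split?, hus, pvSp_splitOn]
  have hfil : ((PySem.Str.split? s "_").getD []).filter (fun part => !(part == ""))
      = ((pvSp [] s.toList).filter (fun piece => !(piece == []))).map String.ofList := by
    rw [hsplit, List.filter_map]
    congr 1
    apply List.filter_congr
    intro x _
    have hiff : (String.ofList x = "") ↔ x = [] := by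
      constructor
      · intro hh
        have := congrArg String.toList hh
        simpa [String.toList_ofList] using this
      · rintro rfl; rfl
    have h1 : (String.ofList x == "") = (x == []) := by
      by_cases hx : x = []
      · subst hx
        have h2 : String.ofList ([] : List Char) = "" := hiff.mpr rfl
        rw [beq_iff_eq.mpr h2, beq_iff_eq.mpr rfl]
      · have h2 : String.ofList x ≠ "" := fun hh => hx (hiff.mp hh)
        rw [beq_eq_false_iff_ne.mpr h2, beq_eq_false_iff_ne.mpr hx]
    show (!(String.ofList x == "")) = (!(x == []))
    rw [h1]
  set parts := ((PySem.Str.split? s "_").getD []).filter (fun part => !(part == "")) with hpartsdef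
  have hgood : ∀ p ∈ parts, p.toList ≠ [] ∧ '_' ∉ p.toList := by
    intro p hp
    rw [hfil] at hp
    obtain ⟨piece, hpiece, rfl⟩ := List.mem_map.1 hp
    rw [String.toList_ofList]
    refine ⟨?_, ?_⟩
    · have := List.of_mem_filter hpiece
      simpa using this
    · exact pvSp_no_underscore s.toList [] (by simp) piece (List.mem_of_mem_filter hpiece)
  have hjoined : (PySem.Str.join "_" parts).toList
      = PySem.Chars.join ['_'] (parts.map String.toList) := by
    rw [PySem.Str.toList_join, hus]
  exact pv_per_keyword parts (PySem.Str.join "_" parts) hgood hjoined keywords
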